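-- pv_equiv track=rewrite | github.com/humanbeingxx/ml_study | diff_features/compare_diff_set.py | generateDiffSetOneColumn
-- ===== SOURCE A (Python) =====
-- def generateDiffSetOneColumn(column_data):
--     not_x = [ele for ele in column_data if ele[1] != 'x']
--     dict = {}
--     for ele in not_x:
--         if ele[1] not in dict:
--             dict[ele[1]] = [ele[0]]
--         else:
--             dict[ele[1]].append(ele[0])
--     diff = list(dict.values())
--
--     diff_set = set()
--     if(len(diff) <= 1):
--         return diff_set
--     for i in range(0, len(diff) - 1):
--         for j in range(i+1, len(diff)):
--             diff_set.update(generatePair(diff[i], diff[j]))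
--     return diff_set
--
-- def generatePair(A, B):
--     pairs = set()
--     for a in A:
--         for b in B:
--             if a > b:
--                 pairs.add((b, a))
--             else:
--                 pairs.add((a, b))
--     return pairs
-- ===== SOURCE B (Python) =====
-- def generateDiffSetOneColumn(column_data):
--     entries = [ele for ele in column_data if ele[1] != 'x']
--     keys = list(dict.fromkeys(k for _, k in entries))
--     out = set()
--     for i, ki in enumerate(keys):
--         for kj in keys[i + 1:]:
--             for a, ka in entries:
--                 if ka == ki:
--                     for b, kb in entries:
--                         if kb == kj:
--                             out.add((min(a, b), max(a, b)))
--     return out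
-- ===== Notes on version B (the rewrite author's own statement) =====
-- stated objective: alternative
-- what changed: B drops A's dict-of-lists grouping and its integer-index double loop over group lists: it dedups the non-'x' keys once and, for each ordered key pair, scans the flat entry list directly, adding normalized pairs (min,max) to the set.
import Mathlib
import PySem

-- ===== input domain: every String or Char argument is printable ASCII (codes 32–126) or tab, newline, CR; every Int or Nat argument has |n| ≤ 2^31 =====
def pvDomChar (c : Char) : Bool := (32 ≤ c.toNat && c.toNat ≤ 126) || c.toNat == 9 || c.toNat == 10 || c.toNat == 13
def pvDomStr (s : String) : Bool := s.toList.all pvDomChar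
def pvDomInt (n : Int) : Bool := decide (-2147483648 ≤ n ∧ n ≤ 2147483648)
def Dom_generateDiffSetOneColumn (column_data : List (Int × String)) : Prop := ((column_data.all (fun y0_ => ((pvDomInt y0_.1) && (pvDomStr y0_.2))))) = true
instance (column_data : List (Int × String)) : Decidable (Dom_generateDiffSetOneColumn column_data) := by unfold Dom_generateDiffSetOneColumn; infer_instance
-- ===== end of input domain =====

-- B replaces A's dict-of-lists grouping + index double loop by a dedup of the keys and flat scans of the
-- entry list per key pair (objective: alternative; same return value, not faster).

-- ===== PORT A =====
def generatePair (A B : List Int) : List (Int × Int) :=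
  A.foldl (fun pairs a =>
    B.foldl (fun pairs b =>
      if a > b then PySem.Set.add pairs (b, a) else PySem.Set.add pairs (a, b)) pairs) []

def generateDiffSetOneColumn (column_data : List (Int × String)) : List (Int × Int) :=
  let not_x := column_data.filter (fun ele => ele.2 != "x")
  let d : PySem.Dict String (List Int) :=
    not_x.foldl (fun d ele =>
      if d.contains ele.2 then d.insert ele.2 (d.getD ele.2 [] ++ [ele.1])
      else d.insert ele.2 [ele.1]) PySem.Dict.empty
  let diff := d.values
  if diff.length ≤ 1 then []
  else
    (PySem.List.pyRange 0 ((diff.length : Int) - 1) 1).foldl (fun s i =>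
      (PySem.List.pyRange (i + 1) (diff.length : Int) 1).foldl (fun s j =>
        PySem.Set.update s (generatePair (PySem.List.pyGetD diff i []) (PySem.List.pyGetD diff j []))) s) []

-- ===== PORT B =====
-- scan of the flat entry list for one key pair (ki, kj): the two innermost loops of Source B
def pairScan (entries : List (Int × String)) (ki kj : String) (s : List (Int × Int)) : List (Int × Int) :=
  entries.foldl (fun s e =>
    if e.2 == ki then
      entries.foldl (fun s e' =>
        if e'.2 == kj then PySem.Set.add s (min e.1 e'.1, max e.1 e'.1) else s) s
    else s) s

-- 'for i, ki in enumerate(keys): for kj in keys[i+1:]'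
def keyPairLoop (entries : List (Int × String)) : List String → List (Int × Int) → List (Int × Int)
  | [], s => s
  | ki :: rest, s => keyPairLoop entries rest (rest.foldl (fun s kj => pairScan entries ki kj s) s)

def generateDiffSetOneColumn_alt (column_data : List (Int × String)) : List (Int × Int) :=
  let entries := column_data.filter (fun ele => ele.2 != "x")
  let keys := PySem.List.dedup (entries.map (fun e => e.2))
  keyPairLoop entries keys []

-- ===== PRECONDITION & SPEC =====
def Spec_generateDiffSetOneColumn (column_data : List (Int × String)) (out : List (Int × Int)) : Prop := out = generateDiffSetOneColumn_alt column_data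
instance (column_data : List (Int × String)) (out : List (Int × Int)) : Decidable (Spec_generateDiffSetOneColumn column_data out) := by unfold Spec_generateDiffSetOneColumn; infer_instance

-- ===== CLAIM (what is proved, stated in full; the proofs are below) =====
def Claim_equal_generateDiffSetOneColumn : Prop := ∀ (column_data : List (Int × String)), Dom_generateDiffSetOneColumn column_data → Spec_generateDiffSetOneColumn column_data (generateDiffSetOneColumn column_data)

-- ===== LEMMAS AND PROOFS =====

-- the values with key k, in order (what A's dict stores under k)
def groupOf (l : List (Int × String)) (k : String) : List Int :=
  (l.filter (fun e => e.2 == k)).map (fun e => e.1)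

-- abstract "for each pair i<j of list elements" recursion
def pairFold {α S : Type} (F : S → α → α → S) : List α → S → S
  | [], s => s
  | x :: xs, s => pairFold F xs (xs.foldl (fun s y => F s x y) s)

theorem set_update_add {α : Type} [BEq α] [LawfulBEq α] (s p : List α) (x : α) :
    PySem.Set.update s (PySem.Set.add p x) = PySem.Set.add (PySem.Set.update s p) x := by
  by_cases hx : x ∈ p
  · rw [PySem.Set.add_of_mem hx,
      PySem.Set.add_of_mem ((PySem.Set.mem_update s p x).mpr (Or.inr hx))]
  · rw [PySem.Set.add_of_not_mem hx]
    simp [PySem.Set.update, List.foldl_append]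

theorem update_foldl_add {α β : Type} [BEq α] [LawfulBEq α] (g : β → α) (l : List β)
    (s p : List α) :
    PySem.Set.update s (l.foldl (fun p b => PySem.Set.add p (g b)) p)
      = l.foldl (fun s b => PySem.Set.add s (g b)) (PySem.Set.update s p) := by
  induction l generalizing p with
  | nil => rfl
  | cons b l ih => simp only [List.foldl_cons, ih, set_update_add]

theorem update_double_foldl_add {α β γ : Type} [BEq α] [LawfulBEq α] (f : β → γ → α)
    (Bv : List γ) (Av : List β) (s p : List α) :
    PySem.Set.update s (Av.foldl (fun p a => Bv.foldl (fun p b => PySem.Set.add p (f a b)) p) p)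
      = Av.foldl (fun s a => Bv.foldl (fun s b => PySem.Set.add s (f a b)) s) (PySem.Set.update s p) := by
  induction Av generalizing p with
  | nil => rfl
  | cons a Av ih => simp only [List.foldl_cons, ih, update_foldl_add]

theorem norm_add (p : List (Int × Int)) (a b : Int) :
    (if a > b then PySem.Set.add p (b, a) else PySem.Set.add p (a, b))
      = PySem.Set.add p (min a b, max a b) := by
  split_ifs with h
  · rw [show min a b = b by omega, show max a b = a by omega]
  · rw [show min a b = a by omega, show max a b = b by omega]

theorem update_generatePair (Av Bv : List Int) (s : List (Int × Int)) :
    PySem.Set.update s (generatePair Av Bv)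
      = Av.foldl (fun s a => Bv.foldl (fun s b => PySem.Set.add s (min a b, max a b)) s) s := by
  have h1 : generatePair Av Bv
      = Av.foldl (fun p a => Bv.foldl (fun p b =>
          PySem.Set.add p (min a b, max a b)) p) [] := by
    unfold generatePair
    refine PySem.List.foldl_congr_mem _ _ _ _ (fun p a _ => ?_)
    exact PySem.List.foldl_congr_mem _ _ _ _ (fun q b _ => norm_add q a b)
  rw [h1, update_double_foldl_add (f := fun a b => ((min a b, max a b) : Int × Int))]
  rfl

theorem pairScan_eq (entries : List (Int × String)) (ki kj : String) (s : List (Int × Int)) :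
    pairScan entries ki kj s
      = (groupOf entries ki).foldl (fun s a =>
          (groupOf entries kj).foldl (fun s b => PySem.Set.add s (min a b, max a b)) s) s := by
  unfold pairScan groupOf
  simp only [PySem.List.foldl_if_eq_foldl_filter, List.foldl_map]

-- the dict-building loop of A, characterised
theorem dict_loop_getD (l : List (Int × String)) (d : PySem.Dict String (List Int)) (k : String) :
    (l.foldl (fun d e => d.insert e.2 (d.getD e.2 [] ++ [e.1])) d).getD k []
      = d.getD k [] ++ groupOf l k := by
  induction l generalizing d with
  | nil => simp [groupOf]
  | cons e l ih =>
    simp only [List.foldl_cons, ih]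
    by_cases hk : k = e.2
    · subst hk
      rw [PySem.Dict.getD_insert_self]
      simp [groupOf, List.append_assoc]
    · rw [PySem.Dict.getD_insert_of_ne _ _ _ hk]
      have hne : (e.2 == k) = false := by simp [Ne.symm hk]
      simp [groupOf, hne]

theorem dict_loop_step (l : List (Int × String)) (d : PySem.Dict String (List Int)) :
    (l.foldl (fun d ele =>
        if d.contains ele.2 then d.insert ele.2 (d.getD ele.2 [] ++ [ele.1])
        else d.insert ele.2 [ele.1]) d)
      = l.foldl (fun d e => d.insert e.2 (d.getD e.2 [] ++ [e.1])) d := by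
  refine PySem.List.foldl_congr_mem _ _ _ _ (fun d e _ => ?_)
  by_cases h : d.contains e.2 = true
  · simp [h]
  · have h0 : d.getD e.2 [] = [] :=
      PySem.Dict.getD_of_not_contains d [] (by simpa using h)
    simp [h, h0]

theorem pairFold_map {α β S : Type} (F : S → β → β → S) (g : α → β) (l : List α) (s : S) :
    pairFold F (l.map g) s = pairFold (fun s a b => F s (g a) (g b)) l s := by
  induction l generalizing s with
  | nil => rfl
  | cons x xs ih => simp only [List.map_cons, pairFold, ih, List.foldl_map]

theorem pairFold_congr {α S : Type} {F G : S → α → α → S}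
    (h : ∀ s a b, F s a b = G s a b) (l : List α) (s : S) :
    pairFold F l s = pairFold G l s := by
  induction l generalizing s with
  | nil => rfl
  | cons x xs ih =>
    simp only [pairFold, ih]
    congr 1
    exact PySem.List.foldl_congr_mem _ _ _ _ (fun s y _ => h s x y)

theorem pairFold_short {α S : Type} (F : S → α → α → S) (l : List α) (s : S)
    (h : l.length ≤ 1) : pairFold F l s = s := by
  match l, h with
  | [], _ => rfl
  | [x], _ => rfl

theorem keyPairLoop_eq_pairFold (entries : List (Int × String)) (keys : List String)
    (s : List (Int × Int)) :
    keyPairLoop entries keys s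
      = pairFold (fun s ki kj => pairScan entries ki kj s) keys s := by
  induction keys generalizing s with
  | nil => rfl
  | cons k rest ih => simp only [keyPairLoop, pairFold, ih]

theorem loopA_eq_pairFold {α S : Type} (F : S → α → α → S) (dflt : α)
    (diff : List α) (init : S) :
    (PySem.List.pyRange 0 ((diff.length : Int) - 1) 1).foldl (fun s i =>
      (PySem.List.pyRange (i + 1) (diff.length : Int) 1).foldl (fun s j =>
        F s (PySem.List.pyGetD diff i dflt) (PySem.List.pyGetD diff j dflt)) s) init
      = pairFold F diff init := by
  induction diff generalizing init with
  | nil =>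
    rw [PySem.List.pyRange_one_eq_nil (by simp)]
    rfl
  | cons x xs ih =>
    cases xs with
    | nil =>
      rw [show (((x :: ([] : List α)).length : Int) - 1) = 0 by simp,
        PySem.List.pyRange_one_eq_nil le_rfl]
      rfl
    | cons y ys =>
      have hxs0 : (0 : Int) < (((y :: ys).length : Int)) := by
        simp only [List.length_cons]; positivity
      rw [show (((x :: y :: ys).length : Int) - 1) = ((y :: ys).length : Int) by
        simp]
      rw [PySem.List.pyRange_one_cons hxs0, List.foldl_cons]
      have h0 : (PySem.List.pyRange (0 + 1) (((x :: y :: ys).length : Int)) 1).foldl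
          (fun s j => F s (PySem.List.pyGetD (x :: y :: ys) 0 dflt)
            (PySem.List.pyGetD (x :: y :: ys) j dflt)) init
          = (y :: ys).foldl (fun s z => F s x z) init := by
        simp only [PySem.List.pyGetD_zero_cons]
        rw [PySem.List.foldl_pyRange_pyGetD' (x :: y :: ys) dflt (fun s z => F s x z) init
          (show (0 : Int) ≤ 0 + 1 by norm_num)]
        norm_num
      rw [h0]
      have hre : (PySem.List.pyRange (0 + 1) (((y :: ys).length : Int)) 1).foldl (fun s i =>
            (PySem.List.pyRange (i + 1) (((x :: y :: ys).length : Int)) 1).foldl (fun s j =>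
              F s (PySem.List.pyGetD (x :: y :: ys) i dflt)
                  (PySem.List.pyGetD (x :: y :: ys) j dflt)) s)
            ((y :: ys).foldl (fun s z => F s x z) init)
          = (PySem.List.pyRange 0 (((y :: ys).length : Int) - 1) 1).foldl (fun s i =>
            (PySem.List.pyRange (i + 1) (((y :: ys).length : Int)) 1).foldl (fun s j =>
              F s (PySem.List.pyGetD (y :: ys) i dflt)
                  (PySem.List.pyGetD (y :: ys) j dflt)) s)
            ((y :: ys).foldl (fun s z => F s x z) init) := by
        rw [PySem.List.pyRange_one (0 + 1) (((y :: ys).length : Int)),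
          PySem.List.pyRange_one 0 (((y :: ys).length : Int) - 1)]
        simp only [List.foldl_map]
        rw [show ((((y :: ys).length : Int)) - (0 + 1)) = (((y :: ys).length : Int) - 1 - 0) by ring]
        refine PySem.List.foldl_congr_mem _ _ _ _ (fun s k _ => ?_)
        have e1 : PySem.List.pyGetD (x :: y :: ys) ((0 + 1) + (k : Int)) dflt
            = PySem.List.pyGetD (y :: ys) (0 + (k : Int)) dflt := by
          rw [show ((0 : Int) + 1 + (k : Int)) = (((k + 1 : Nat)) : Int) by push_cast; ring,
            show ((0 : Int) + (k : Int)) = ((k : Nat) : Int) by ring,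
            PySem.List.pyGetD_natCast, PySem.List.pyGetD_natCast]
          simp
        simp only [e1]
        rw [PySem.List.foldl_pyRange_pyGetD' (x :: y :: ys) dflt
          (fun s z => F s (PySem.List.pyGetD (y :: ys) (0 + (k : Int)) dflt) z) s
          (show (0 : Int) ≤ (0 + 1 + (k : Int)) + 1 by positivity)]
        rw [PySem.List.foldl_pyRange_pyGetD' (y :: ys) dflt
          (fun s z => F s (PySem.List.pyGetD (y :: ys) (0 + (k : Int)) dflt) z) s
          (show (0 : Int) ≤ (0 + (k : Int)) + 1 by positivity)]
        congr 1
        rw [show (((0 : Int) + 1 + (k : Int)) + 1).toNat = (k : Nat) + 1 + 1 by omega,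
          show (((0 : Int) + (k : Int)) + 1).toNat = (k : Nat) + 1 by omega]
        rfl
      rw [hre, ih]
      rfl

-- ===== VERDICT (by name: the statement is the Claim_ definition above) =====
theorem generateDiffSetOneColumn_spec : Claim_equal_generateDiffSetOneColumn := by
  intro cd _
  unfold Spec_generateDiffSetOneColumn
  show generateDiffSetOneColumn cd = generateDiffSetOneColumn_alt cd
  simp only [generateDiffSetOneColumn, generateDiffSetOneColumn_alt]
  set notX := cd.filter (fun ele => ele.2 != "x") with hnotX
  set keys : List String := PySem.Set.ofList (notX.map (fun e => e.2)) with hkeys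
  set d : PySem.Dict String (List Int) :=
    notX.foldl (fun d ele =>
      if d.contains ele.2 then d.insert ele.2 (d.getD ele.2 [] ++ [ele.1])
      else d.insert ele.2 [ele.1]) PySem.Dict.empty with hd
  have hdstep : d = notX.foldl (fun d e => d.insert e.2 (d.getD e.2 [] ++ [e.1]))
      PySem.Dict.empty := by rw [hd, dict_loop_step]
  have hkeysd : d.keys = keys := by
    rw [hdstep, PySem.Dict.keys_foldl_insert_key]
    simp [hkeys, PySem.Set.update_nil_left]
  have hnd : d.keys.Nodup := by
    rw [hkeysd, hkeys]; exact PySem.Set.nodup_ofList _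
  have hvals : d.values = keys.map (fun k => groupOf notX k) := by
    rw [PySem.Dict.values_eq_map_keys d hnd [], hkeysd]
    refine List.map_congr_left (fun k _ => ?_)
    rw [hdstep, dict_loop_getD]
    simp
  rw [hvals, PySem.List.dedup_eq_ofList, keyPairLoop_eq_pairFold]
  split_ifs with h
  · rw [pairFold_short _ _ _ (by simpa using h)]
  · rw [← hkeys, loopA_eq_pairFold
        (fun s gi gj => PySem.Set.update s (generatePair gi gj)) ([] : List Int)
        (List.map (fun k => groupOf notX k) keys) [], pairFold_map]
    refine pairFold_congr (fun s ki kj => ?_) _ _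
    rw [update_generatePair, pairScan_eq]
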